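-- pv_equiv track=rewrite | github.com/loomis3632/extract_ | extract2.py | nearest2
-- ===== SOURCE A (Python) =====
-- def nearest2(phone_dict, author_index_dict):
--     """
--     邮箱为空，手机号不为空的处理
--     :param phone_dict:
--     :param author_index_dict:
--     :return:
--     """
--     k = list(sorted(phone_dict.keys()))
--     k1 = list(sorted(author_index_dict.keys()))
--     res = []  # 结果保存
--
--     for i in k:
--         k1.append(i)
--         k1.sort()
--         index = k1.index(i)
--         for_index = index - 1
--         k1.remove(i)
--
--         if for_index >= 0:
--             if author_index_dict[k1[for_index]] != 'null':
--                 res.append(['null', phone_dict[i], author_index_dict[k1[for_index]]])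
--                 author_index_dict[k1[for_index]] = 'null'
--             else:
--                 res.append(['null', phone_dict[i], author_index_dict[k1[for_index]]])
--         else:
--             res.append(['null', phone_dict[i], 'null'])
--     return res
-- ===== SOURCE B (Python) =====
-- def nearest2(phone_dict, author_index_dict):
--     """Same result (and same mutation of author_index_dict) via one sort of the
--     author keys plus a binary search per phone key, instead of re-sorting and
--     scanning the key list for every phone key."""
--     ks = sorted(author_index_dict.keys())
--     res = []
--     for i in sorted(phone_dict.keys()):
--         # bisect_left(ks, i), hand-written since A imports nothing:
--         lo, hi = 0, len(ks)
--         while lo < hi: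
--             mid = (lo + hi) // 2
--             if ks[mid] < i:
--                 lo = mid + 1
--             else:
--                 hi = mid
--         if lo > 0:
--             p = ks[lo - 1]
--             res.append(['null', phone_dict[i], author_index_dict[p]])
--             author_index_dict[p] = 'null'
--         else:
--             res.append(['null', phone_dict[i], 'null'])
--     return res
-- ===== Notes on version B (the rewrite author's own statement) =====
-- stated objective: faster
-- what changed: A re-sorts the author-key list and does linear index/remove scans for every phone key; B sorts the author keys once and finds each phone key's predecessor with a hand-written bisect_left binary search, mutating the dict in the same order.
import Mathlib
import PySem

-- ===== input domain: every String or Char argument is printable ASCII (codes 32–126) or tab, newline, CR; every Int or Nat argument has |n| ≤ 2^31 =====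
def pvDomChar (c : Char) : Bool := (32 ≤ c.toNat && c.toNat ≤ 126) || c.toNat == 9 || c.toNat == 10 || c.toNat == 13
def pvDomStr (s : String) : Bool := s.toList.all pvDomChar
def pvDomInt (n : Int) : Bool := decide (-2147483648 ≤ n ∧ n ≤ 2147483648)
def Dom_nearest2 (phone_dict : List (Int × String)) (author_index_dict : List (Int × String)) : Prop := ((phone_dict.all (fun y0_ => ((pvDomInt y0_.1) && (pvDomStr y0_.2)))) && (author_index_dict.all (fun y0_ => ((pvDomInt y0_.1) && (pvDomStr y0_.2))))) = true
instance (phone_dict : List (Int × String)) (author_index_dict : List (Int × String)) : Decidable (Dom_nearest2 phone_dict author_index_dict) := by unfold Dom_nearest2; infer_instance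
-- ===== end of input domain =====

-- B replaces A's per-phone-key append/sort/index/remove of the author-key list by one sort
-- plus a binary search per phone key. Both Pythons also mutate author_index_dict (identically,
-- see Source B); the equivalence proved here is about the RETURN value only.

-- ===== PORT A =====
-- loop body of A's 'for i in k' (state: k1, author_index_dict, res)
def nearest2StepA (pd : PySem.Dict Int String)
    (st : List Int × PySem.Dict Int String × List (List String)) (i : Int) :
    List Int × PySem.Dict Int String × List (List String) :=
  let k1 := st.1; let ad := st.2.1; let res := st.2.2
  let k1s := PySem.List.sorted (k1 ++ [i]) (fun x => x)          -- k1.append(i); k1.sort()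
  let index : Nat := (PySem.List.index? k1s i).getD 0            -- i ∈ k1s, so index? is always some: getD is exact
  let for_index : Int := (index : Int) - 1
  let k1r := (PySem.List.remove? k1s i).getD k1s                 -- i ∈ k1s, so remove? is always some
  if for_index ≥ 0 then
    let pk := PySem.List.pyGetD k1r for_index 0                  -- 0 ≤ for_index < len k1r: in range
    if ad.getD pk "" ≠ "null" then                               -- pk is an author key: getD is exact
      (k1r, ad.insert pk "null", res ++ [["null", pd.getD i "", ad.getD pk ""]])
    else
      (k1r, ad, res ++ [["null", pd.getD i "", ad.getD pk ""]])
  else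
    (k1r, ad, res ++ [["null", pd.getD i "", "null"]])

def nearest2 (phone_dict : List (Int × String)) (author_index_dict : List (Int × String)) : List (List String) :=
  let pd := PySem.Dict.ofList phone_dict
  let ad := PySem.Dict.ofList author_index_dict
  let k := PySem.List.sorted pd.keys (fun x => x)
  let k1 := PySem.List.sorted ad.keys (fun x => x)
  (k.foldl (nearest2StepA pd) (k1, ad, [])).2.2

-- ===== PORT B =====
-- loop body of Source B's 'for i in sorted(phone_dict.keys())' (state: author_index_dict, res);
-- Source B's hand-written while-loop is exactly bisect_left's algorithm = PySem.List.bisectLeft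
def nearest2StepB (pd : PySem.Dict Int String) (ks : List Int)
    (st : PySem.Dict Int String × List (List String)) (i : Int) :
    PySem.Dict Int String × List (List String) :=
  let ad := st.1; let res := st.2
  let lo := PySem.List.bisectLeft ks i
  if lo > 0 then
    let p := ks.getD (lo - 1) 0                                  -- 0 < lo ≤ len ks: in range
    (ad.insert p "null", res ++ [["null", pd.getD i "", ad.getD p ""]])
  else
    (ad, res ++ [["null", pd.getD i "", "null"]])

def nearest2_alt (phone_dict : List (Int × String)) (author_index_dict : List (Int × String)) : List (List String) :=
  let pd := PySem.Dict.ofList phone_dict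
  let ad := PySem.Dict.ofList author_index_dict
  let ks := PySem.List.sorted ad.keys (fun x => x)
  ((PySem.List.sorted pd.keys (fun x => x)).foldl (nearest2StepB pd ks) (ad, [])).2

-- ===== PRECONDITION & SPEC =====
def Spec_nearest2 (phone_dict : List (Int × String)) (author_index_dict : List (Int × String)) (out : List (List String)) : Prop := out = nearest2_alt phone_dict author_index_dict
instance (phone_dict : List (Int × String)) (author_index_dict : List (Int × String)) (out : List (List String)) : Decidable (Spec_nearest2 phone_dict author_index_dict out) := by unfold Spec_nearest2; infer_instance

-- ===== CLAIM (what is proved, stated in full; the proofs are below) =====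
def Claim_equal_nearest2 : Prop := ∀ (phone_dict : List (Int × String)) (author_index_dict : List (Int × String)), Dom_nearest2 phone_dict author_index_dict → Spec_nearest2 phone_dict author_index_dict (nearest2 phone_dict author_index_dict)

-- ===== LEMMAS AND PROOFS =====

-- everything strictly before position bisectLeft ks i in ks is < i
theorem pv_take_lt (ks : List Int) (i : Int)
    (hlt : ∀ (j : Nat) (hj : j < ks.length), j < PySem.List.bisectLeft ks i → ks[j] < i) :
    ∀ x ∈ ks.take (PySem.List.bisectLeft ks i), x < i := by
  intro x hx
  obtain ⟨j, hj, rfl⟩ := List.mem_iff_getElem.1 hx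
  have hj' : j < ks.length := lt_of_lt_of_le hj (by simp [List.length_take])
  have hjlo : j < PySem.List.bisectLeft ks i := lt_of_lt_of_le hj (by simp [List.length_take])
  rw [List.getElem_take]
  exact hlt j hj' hjlo

-- everything from position bisectLeft ks i on in ks is ≥ i
theorem pv_drop_ge (ks : List Int) (i : Int)
    (hge : ∀ (j : Nat) (hj : j < ks.length), PySem.List.bisectLeft ks i ≤ j → i ≤ ks[j]) :
    ∀ x ∈ ks.drop (PySem.List.bisectLeft ks i), i ≤ x := by
  intro x hx
  obtain ⟨j, hj, rfl⟩ := List.mem_iff_getElem.1 hx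
  have hj' : PySem.List.bisectLeft ks i + j < ks.length := by
    have := hj; simp [List.length_drop] at this; omega
  rw [List.getElem_drop]
  exact hge _ hj' (Nat.le_add_right _ _)

-- A's k1.append(i); k1.sort() splits ks at lo = bisect_left(ks, i)
theorem pv_sorted_append_eq (ks : List Int) (i : Int) (hp : ks.Pairwise (· < ·)) :
    PySem.List.sorted (ks ++ [i]) (fun x => x) false
      = ks.take (PySem.List.bisectLeft ks i) ++ i :: ks.drop (PySem.List.bisectLeft ks i) := by
  obtain ⟨hle, hlt, hge⟩ := PySem.List.bisectLeft_spec ks i (hp.imp le_of_lt)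
  have htake := pv_take_lt ks i hlt
  have hdrop := pv_drop_ge ks i hge
  apply PySem.List.sorted_id_eq_of_perm_of_pairwise
  · refine List.Perm.trans List.perm_middle ?_
    rw [List.take_append_drop]
    exact (List.perm_append_singleton i ks).symm
  · rw [List.pairwise_append]
    refine ⟨List.Pairwise.sublist (List.take_sublist _ _) (hp.imp le_of_lt), ?_, ?_⟩
    · rw [List.pairwise_cons]
      exact ⟨hdrop, List.Pairwise.sublist (List.drop_sublist _ _) (hp.imp le_of_lt)⟩
    · intro a ha b hb
      rcases List.mem_cons.1 hb with rfl | hb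
      · exact le_of_lt (htake a ha)
      · exact le_of_lt (lt_of_lt_of_le (htake a ha) (hdrop b hb))

-- overwriting a key with the value it already has does not change the dict
theorem pv_insert_self {d : PySem.Dict Int String} {k : Int} {v : String}
    (hnd : d.keys.Nodup) (hv : d.get? k = some v) : d.insert k v = d := by
  have hc : d.contains k = true := by rw [PySem.Dict.contains_eq_isSome_get?, hv]; rfl
  apply PySem.Dict.ext
  rw [PySem.Dict.items_insert_of_contains d v hc]
  have : ∀ p ∈ d.items, (if (p.1 == k) = true then (k, v) else p) = p := by
    intro p hp
    by_cases h : p.1 = k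
    · have h2 : d.get? p.1 = some p.2 := PySem.Dict.get?_of_mem_items d (by exact hp) hnd
      rw [h, hv] at h2
      obtain ⟨pk, pv⟩ := p
      simp only at h
      subst h
      simp [(Option.some_inj.1 h2)]
    · simp [h]
  rw [List.map_congr_left this]
  simp

-- one iteration of A's loop = one iteration of B's loop, and A's k1 comes back to ks
theorem pv_step_eq (pd : PySem.Dict Int String) (ks : List Int) (hp : ks.Pairwise (· < ·))
    (ad : PySem.Dict Int String) (res : List (List String))
    (hnd : ad.keys.Nodup) (hmem : ∀ x ∈ ks, x ∈ ad.keys) (i : Int) :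
    nearest2StepA pd (ks, ad, res) i = (ks, nearest2StepB pd ks (ad, res) i) := by
  obtain ⟨hle, hlt, hge⟩ := PySem.List.bisectLeft_spec ks i (hp.imp le_of_lt)
  have hsort := pv_sorted_append_eq ks i hp
  set lo := PySem.List.bisectLeft ks i with hlo
  have htklen : (ks.take lo).length = lo := by simp [List.length_take]; omega
  have hnotmem : i ∉ ks.take lo := fun hm => lt_irrefl i (pv_take_lt ks i hlt i hm)
  have hidx : PySem.List.index? (ks.take lo ++ i :: ks.drop lo) i = some lo :=
    (PySem.List.index?_eq_some_iff _ _ _).2 ⟨_, _, rfl, htklen, hnotmem⟩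
  have hrem : PySem.List.remove? (ks.take lo ++ i :: ks.drop lo) i = some ks := by
    rw [PySem.List.remove?_eq_some_erase _ i (by simp)]
    rw [List.erase_append_right _ hnotmem, List.erase_cons_head, List.take_append_drop]
  simp only [nearest2StepA, nearest2StepB, hsort, hidx, hrem, Option.getD_some]
  rcases Nat.eq_zero_or_pos lo with h0 | hpos
  · rw [if_neg (show ¬((lo : Int) - 1 ≥ 0) by omega), if_neg (show ¬(0 < lo) by omega)]
  · have hc1 : ((lo : Int) - 1 ≥ 0) := by omega
    rw [if_pos hc1, if_pos hpos]
    have hpk : PySem.List.pyGetD ks ((lo : Int) - 1) 0 = ks.getD (lo - 1) 0 := by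
      rw [PySem.List.pyGetD_eq_getElem ks 0 (by omega) (by omega)]
      rw [List.getD_eq_getElem ks 0 (by omega)]
      congr 1
      omega
    rw [hpk]
    have hpkmem : ks.getD (lo - 1) 0 ∈ ad.keys := by
      apply hmem
      rw [List.getD_eq_getElem ks 0 (by omega)]
      exact List.getElem_mem _
    by_cases hnull : ad.getD (ks.getD (lo - 1) 0) "" ≠ "null"
    · rw [if_pos hnull]
    · rw [if_neg hnull]
      rw [not_not] at hnull
      have hcont : ad.contains (ks.getD (lo - 1) 0) = true :=
        (PySem.Dict.contains_iff_mem_keys ad _).2 hpkmem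
      have hsome : ∃ v, ad.get? (ks.getD (lo - 1) 0) = some v := by
        have := PySem.Dict.contains_eq_isSome_get? ad (ks.getD (lo - 1) 0)
        rw [hcont] at this
        exact Option.isSome_iff_exists.1 this.symm
      obtain ⟨v, hv⟩ := hsome
      have : v = "null" := by
        rw [PySem.Dict.getD_of_get?_eq_some ad "" hv] at hnull
        exact hnull
      subst this
      rw [pv_insert_self hnd hv]

-- B's step only overwrites an existing author key, so the key list is unchanged
theorem pv_stepB_keys (pd : PySem.Dict Int String) (ks : List Int) (hp : ks.Pairwise (· < ·))
    (ad : PySem.Dict Int String) (res : List (List String))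
    (hmem : ∀ x ∈ ks, x ∈ ad.keys) (i : Int) :
    (nearest2StepB pd ks (ad, res) i).1.keys = ad.keys := by
  obtain ⟨hle, _, _⟩ := PySem.List.bisectLeft_spec ks i (hp.imp le_of_lt)
  simp only [nearest2StepB]
  by_cases hpos : 0 < PySem.List.bisectLeft ks i
  · rw [if_pos hpos]
    apply PySem.Dict.keys_insert_of_contains
    apply (PySem.Dict.contains_iff_mem_keys ad _).2
    apply hmem
    rw [List.getD_eq_getElem ks 0 (by omega)]
    exact List.getElem_mem _
  · rw [if_neg hpos]

theorem pv_loop_eq (pd : PySem.Dict Int String) (ks : List Int) (hp : ks.Pairwise (· < ·)) :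
    ∀ (l : List Int) (ad : PySem.Dict Int String) (res : List (List String)),
      ad.keys.Nodup → (∀ x ∈ ks, x ∈ ad.keys) →
      (l.foldl (nearest2StepA pd) (ks, ad, res)).2.2
        = (l.foldl (nearest2StepB pd ks) (ad, res)).2 := by
  intro l
  induction l with
  | nil => intro ad res _ _; rfl
  | cons i t ih =>
    intro ad res hnd hmem
    have hkeys := pv_stepB_keys pd ks hp ad res hmem i
    simp only [List.foldl_cons, pv_step_eq pd ks hp ad res hnd hmem i]
    have := ih (nearest2StepB pd ks (ad, res) i).1 (nearest2StepB pd ks (ad, res) i).2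
      (hkeys ▸ hnd) (fun x hx => hkeys ▸ hmem x hx)
    simpa using this

-- ===== VERDICT (by name: the statement is the Claim_ definition above) =====
theorem nearest2_spec : Claim_equal_nearest2 := by
  intro phone_dict author_index_dict _
  unfold Spec_nearest2 nearest2 nearest2_alt
  have hnd : (PySem.Dict.ofList author_index_dict).keys.Nodup :=
    PySem.Dict.nodup_keys_ofList author_index_dict
  have hperm := PySem.List.sorted_perm (PySem.Dict.ofList author_index_dict).keys
    (fun x : Int => x) false
  have hndks : (PySem.List.sorted (PySem.Dict.ofList author_index_dict).keys
      (fun x : Int => x) false).Nodup := hperm.symm.nodup hnd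
  have hp : (PySem.List.sorted (PySem.Dict.ofList author_index_dict).keys
      (fun x : Int => x) false).Pairwise (· < ·) :=
    (List.Pairwise.and (PySem.List.sorted_pairwise _ _) hndks).imp
      (fun h => lt_of_le_of_ne h.1 h.2)
  exact pv_loop_eq _ _ hp _ _ _ hnd (fun x hx => hperm.mem_iff.1 hx)
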